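-- pv_equiv track=rewrite | github.com/ThomasTrepanier/log6307-final-project | data/pyscent/stackoverflow/code-dump/161127_17.py | arrange_list
-- ===== SOURCE A (Python) =====
-- def arrange_list(arr):
--     value = 0
--     for x in range(len(arr)-1):
--         if arr[x] != 0:
--             value += arr[x]
--         else:
--             value = 0
--         if arr[x+1] != 0:
--             arr[x] = 0
--         else:
--             arr[x] = value
--             value = 0
--     if value !=0:
--         arr[-1] = value + arr[-1]
--     return arr
-- ===== SOURCE B (Python) =====
-- def arrange_list(arr):
--     out = []
--     i = 0
--     n = len(arr)
--     while i < n: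
--         if arr[i] == 0:
--             out.append(0)
--             i += 1
--         else:
--             # collapse the maximal nonzero run starting at i
--             k = i
--             s = 0
--             while k < n and arr[k] != 0:
--                 s += arr[k]
--                 k += 1
--             out += [0] * (k - i - 1)
--             out.append(s)
--             i = k
--     arr[:] = out
--     return arr
-- ===== Notes on version B (the rewrite author's own statement) =====
-- stated objective: simpler
-- what changed: A's single index pass mutating arr while threading a reset accumulator across range(len(arr)-1) plus a final fix-up of the last element is replaced by a direct recursive run-collapse: each maximal run of nonzero elements is found, summed and rewritten as zeros with the sum at the run's last index.
import Mathlib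
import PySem

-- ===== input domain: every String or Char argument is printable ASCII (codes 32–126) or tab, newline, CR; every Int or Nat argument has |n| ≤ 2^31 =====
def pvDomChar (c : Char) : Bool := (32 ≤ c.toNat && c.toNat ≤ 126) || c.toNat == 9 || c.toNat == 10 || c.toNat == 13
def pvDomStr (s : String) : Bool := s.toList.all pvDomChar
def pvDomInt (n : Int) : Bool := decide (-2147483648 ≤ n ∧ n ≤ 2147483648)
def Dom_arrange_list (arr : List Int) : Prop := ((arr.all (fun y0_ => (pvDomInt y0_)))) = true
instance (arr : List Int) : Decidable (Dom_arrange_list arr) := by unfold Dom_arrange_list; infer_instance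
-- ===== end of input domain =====

-- B replaces A's index-by-index accumulator pass over range(len(arr)-1) by a recursive
-- run-collapse (each maximal nonzero run becomes zeros with its sum at the run's last index);
-- objective: simpler. A mutates arr in place; B assigns arr[:] the same final contents, so
-- the theorems below (about the returned value) also describe the visible mutation.

-- ===== PORT A =====
def arrange_list (arr : List Int) : List Int :=
  let st := (PySem.List.pyRange 0 ((arr.length : Int) - 1) 1).foldl
    (fun (st : List Int × Int) x =>
      let a := st.1
      let value := if PySem.List.pyGetD a x 0 ≠ 0 then st.2 + PySem.List.pyGetD a x 0 else (0:Int)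
      if PySem.List.pyGetD a (x + 1) 0 ≠ 0 then (PySem.List.pySetD a x 0, value)
      else (PySem.List.pySetD a x value, 0))
    (arr, (0:Int))
  if st.2 ≠ 0 then PySem.List.pySetD st.1 (-1) (st.2 + PySem.List.pyGetD st.1 (-1) 0) else st.1

-- ===== PORT B =====
-- Source B's inner while loop: length and sum of the leading nonzero run
def runAlt : List Int → Nat × Int
  | [] => (0, 0)
  | x :: xs => if x = 0 then (0, 0) else ((runAlt xs).1 + 1, x + (runAlt xs).2)

-- termination fact for collapseAlt (cited by its decreasing_by)
lemma pvRun_pos (x : Int) (xs : List Int) (h : ¬ x = 0) : 1 ≤ (runAlt (x :: xs)).1 := by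
  simp [runAlt, h]

-- Source B's outer while loop: each step consumes one zero or one maximal nonzero run
def collapseAlt : List Int → List Int
  | [] => []
  | x :: xs =>
    if h : x = 0 then 0 :: collapseAlt xs
    else
      List.replicate ((runAlt (x :: xs)).1 - 1) 0 ++
        [(runAlt (x :: xs)).2] ++
        collapseAlt ((x :: xs).drop (runAlt (x :: xs)).1)
termination_by l => l.length
decreasing_by
  · simp
  · have := pvRun_pos x xs h
    simp [List.length_drop]
    omega

def arrange_list_alt (arr : List Int) : List Int := collapseAlt arr

-- ===== PRECONDITION & SPEC =====
def Spec_arrange_list (arr : List Int) (out : List Int) : Prop := out = arrange_list_alt arr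
instance (arr : List Int) (out : List Int) : Decidable (Spec_arrange_list arr out) := by unfold Spec_arrange_list; infer_instance

-- ===== CLAIM (what is proved, stated in full; the proofs are below) =====
def Claim_equal_arrange_list : Prop := ∀ (arr : List Int), Dom_arrange_list arr → Spec_arrange_list arr (arrange_list arr)

-- ===== LEMMAS AND PROOFS =====

-- the list A's loop leaves behind (last element untouched), given carry s
def loopRes : Int → List Int → List Int
  | _, [] => []
  | _, [a] => [a]
  | s, a :: b :: rest =>
    let s' := if a ≠ 0 then s + a else 0
    (if b ≠ 0 then (0:Int) else s') :: loopRes (if b ≠ 0 then s' else 0) (b :: rest)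

-- the value variable after A's loop
def loopVal : Int → List Int → Int
  | s, [] => s
  | s, [_] => s
  | s, a :: b :: rest =>
    let s' := if a ≠ 0 then s + a else 0
    loopVal (if b ≠ 0 then s' else 0) (b :: rest)

-- A's full result (loop + final arr[-1] fix-up), as a structural recursion
def goA : Int → List Int → List Int
  | _, [] => []
  | s, [a] => [s + a]
  | s, a :: b :: rest =>
    let s' := if a ≠ 0 then s + a else 0
    if b ≠ 0 then 0 :: goA s' (b :: rest) else s' :: goA 0 (b :: rest)

lemma pvSet_neg_one_single (a v : Int) : PySem.List.pySetD [a] (-1) v = [v] := by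
  simp [PySem.List.pySetD, PySem.List.pySet?, PySem.List.pyIdx?]

lemma pvSet_neg_one_cons (c v : Int) (r : List Int) (hr : r ≠ []) :
    PySem.List.pySetD (c :: r) (-1) v = c :: PySem.List.pySetD r (-1) v := by
  rcases r with _ | ⟨b, t⟩
  · simp at hr
  · simp [PySem.List.pySetD, PySem.List.pySet?, PySem.List.pyIdx?]

lemma pvGet_neg_one_cons (c : Int) (r : List Int) (hr : r ≠ []) :
    PySem.List.pyGetD (c :: r) (-1) (0:Int) = PySem.List.pyGetD r (-1) 0 := by
  rcases List.exists_cons_of_ne_nil hr with ⟨y, t, rfl⟩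
  simp [PySem.List.pyGetD, PySem.List.pyGet?_neg_one, List.getLast?_cons]

lemma loopRes_ne_nil (s : Int) (l : List Int) (h : l ≠ []) : loopRes s l ≠ [] := by
  rcases l with _ | ⟨a, _ | ⟨b, rest⟩⟩
  · simp at h
  · simp [loopRes]
  · simp [loopRes]

-- A's loop over the remaining indices, as a recursion on the untouched suffix
lemma pvLoop (suffix : List Int) (p : List Int) (s : Int) (h : suffix ≠ []) :
    (PySem.List.pyRange (p.length : Int) ((p.length : Int) + suffix.length - 1) 1).foldl
      (fun (st : List Int × Int) x =>
        let a := st.1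
        let value := if PySem.List.pyGetD a x 0 ≠ 0 then st.2 + PySem.List.pyGetD a x 0 else (0:Int)
        if PySem.List.pyGetD a (x + 1) 0 ≠ 0 then (PySem.List.pySetD a x 0, value)
        else (PySem.List.pySetD a x value, 0))
      (p ++ suffix, s)
    = (p ++ loopRes s suffix, loopVal s suffix) := by
  induction suffix generalizing p s with
  | nil => simp at h
  | cons a t ih =>
    rcases t with _ | ⟨b, rest⟩
    · rw [show ((p.length : Int) + ([a] : List Int).length - 1) = (p.length : Int) by simp]
      rw [show PySem.List.pyRange (p.length : Int) (p.length : Int) 1 = [] by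
        simp [PySem.List.pyRange]]
      simp [loopRes, loopVal]
    · set f := (fun (st : List Int × Int) x =>
        let a := st.1
        let value := if PySem.List.pyGetD a x 0 ≠ 0 then st.2 + PySem.List.pyGetD a x 0 else (0:Int)
        if PySem.List.pyGetD a (x + 1) 0 ≠ 0 then (PySem.List.pySetD a x 0, value)
        else (PySem.List.pySetD a x value, 0)) with hf
      have hcons : PySem.List.pyRange (p.length : Int) ((p.length : Int) + (a :: b :: rest).length - 1) 1
          = (p.length : Int) :: PySem.List.pyRange ((p.length : Int) + 1) ((p.length : Int) + (a :: b :: rest).length - 1) 1 := by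
        apply PySem.List.pyRange_one_cons
        simp
        omega
      rw [hcons, List.foldl_cons]
      have hga : PySem.List.pyGetD (p ++ a :: b :: rest) (p.length : Int) 0 = a := by
        simp [PySem.List.pyGetD]
      have hgb0 : PySem.List.pyGet? (p ++ a :: b :: rest) ((p.length : Int) + 1) = some b := by
        rw [show (p ++ a :: b :: rest) = (p ++ [a]) ++ b :: rest by simp]
        rw [show ((p.length : Int) + 1) = (((p ++ [a]).length : Int)) by
              push_cast [List.length_append, List.length_cons, List.length_nil]; ring]
        exact PySem.List.pyGet?_append_length ..
      have hgb : PySem.List.pyGetD (p ++ a :: b :: rest) ((p.length : Int) + 1) 0 = b := by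
        simp [PySem.List.pyGetD, hgb0]
      have hset : ∀ w : Int, PySem.List.pySetD (p ++ a :: b :: rest) (p.length : Int) w
          = p ++ [w] ++ b :: rest := by
        intro w
        rw [PySem.List.pySetD_natCast]
        rw [List.set_append]
        simp
      have key : ∀ (c : Int) (s2 : Int),
          (PySem.List.pyRange ((p.length : Int) + 1) ((p.length : Int) + ((a :: b :: rest).length : Int) - 1) 1).foldl
            f (p ++ [c] ++ b :: rest, s2)
          = (p ++ [c] ++ loopRes s2 (b :: rest), loopVal s2 (b :: rest)) := by
        intro c s2
        have k := ih (p ++ [c]) s2 (by simp)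
        rw [show (((p ++ [c]).length : Int)) = (p.length : Int) + 1 by
              push_cast [List.length_append, List.length_cons, List.length_nil]; ring] at k
        rw [show ((p.length : Int) + 1 + (((b :: rest).length : Nat) : Int) - 1)
              = ((p.length : Int) + (((a :: b :: rest).length : Nat) : Int) - 1) by
              push_cast [List.length_cons]; ring] at k
        exact k
      have hstep : f (p ++ a :: b :: rest, s) (p.length : Int)
          = if b ≠ 0 then (p ++ [(0:Int)] ++ b :: rest, if a ≠ 0 then s + a else 0)
            else (p ++ [if a ≠ 0 then s + a else (0:Int)] ++ b :: rest, (0:Int)) := by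
        rw [hf]
        simp only [hga, hgb, hset]
      rw [hstep]
      by_cases hb : b = 0
      · rw [if_neg (by simpa using hb)]
        rw [key]
        simp [loopRes, loopVal, hb, List.append_assoc]
      · rw [if_pos hb]
        rw [key]
        simp [loopRes, loopVal, hb, List.append_assoc]

-- A's final 'if value != 0: arr[-1] = value + arr[-1]' turns (loopRes, loopVal) into goA
lemma pvFin (l : List Int) (s : Int) (h : l ≠ []) :
    (if loopVal s l ≠ 0 then
        PySem.List.pySetD (loopRes s l) (-1) (loopVal s l + PySem.List.pyGetD (loopRes s l) (-1) 0)
      else loopRes s l) = goA s l := by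
  induction l generalizing s with
  | nil => simp at h
  | cons a t ih =>
    rcases t with _ | ⟨b, rest⟩
    · by_cases hs : s = 0
      · simp [loopRes, loopVal, goA, hs]
      · simp only [loopRes, loopVal, goA]
        rw [if_pos (by exact hs)]
        rw [pvSet_neg_one_single]
        simp [PySem.List.pyGetD, PySem.List.pyGet?_neg_one]
    · have hne : loopRes (if b ≠ 0 then (if a ≠ 0 then s + a else 0) else 0) (b :: rest) ≠ [] :=
        loopRes_ne_nil _ _ (by simp)
      have hR : loopRes s (a :: b :: rest) =
          (if b ≠ 0 then (0:Int) else (if a ≠ 0 then s + a else 0)) ::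
            loopRes (if b ≠ 0 then (if a ≠ 0 then s + a else 0) else 0) (b :: rest) := by
        simp [loopRes]
      have hV : loopVal s (a :: b :: rest) =
          loopVal (if b ≠ 0 then (if a ≠ 0 then s + a else 0) else 0) (b :: rest) := by
        simp [loopVal]
      rw [hR, hV]
      rw [pvGet_neg_one_cons _ _ hne]
      have ihb := ih (if b ≠ 0 then (if a ≠ 0 then s + a else 0) else 0) (by simp)
      by_cases hv : loopVal (if b ≠ 0 then (if a ≠ 0 then s + a else 0) else 0) (b :: rest) = 0
      · rw [if_neg (by simpa using hv)] at ihb ⊢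
        rw [show goA s (a :: b :: rest) =
          (if b ≠ 0 then (0:Int) else (if a ≠ 0 then s + a else 0)) ::
            goA (if b ≠ 0 then (if a ≠ 0 then s + a else 0) else 0) (b :: rest) by
            by_cases hb : b = 0 <;> simp [goA, hb]]
        rw [← ihb]
      · rw [if_pos hv] at ihb ⊢
        rw [pvSet_neg_one_cons _ _ _ hne]
        rw [show goA s (a :: b :: rest) =
          (if b ≠ 0 then (0:Int) else (if a ≠ 0 then s + a else 0)) ::
            goA (if b ≠ 0 then (if a ≠ 0 then s + a else 0) else 0) (b :: rest) by
            by_cases hb : b = 0 <;> simp [goA, hb]]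
        rw [← ihb]

-- proof-side view of the run: its length, and its sum as a take-prefix
def runlenAlt : List Int → Nat
  | [] => 0
  | x :: xs => if x = 0 then 0 else 1 + runlenAlt xs

lemma runAlt_fst (l : List Int) : (runAlt l).1 = runlenAlt l := by
  induction l with
  | nil => simp [runAlt, runlenAlt]
  | cons x xs ih => by_cases hx : x = 0 <;> simp [runAlt, runlenAlt, hx, ih, Nat.add_comm]

lemma runAlt_snd (l : List Int) : (runAlt l).2 = (l.take (runAlt l).1).sum := by
  induction l with
  | nil => simp [runAlt]
  | cons x xs ih => by_cases hx : x = 0 <;> simp [runAlt, hx, ih]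

lemma pvRunlen_pos (x : Int) (xs : List Int) (h : ¬ x = 0) : 1 ≤ runlenAlt (x :: xs) := by
  simp [runlenAlt, h]

lemma goA_zero_cons (xs : List Int) : goA 0 (0 :: xs) = 0 :: goA 0 xs := by
  rcases xs with _ | ⟨b, rest⟩
  · simp [goA]
  · by_cases hb : b = 0 <;> simp [goA, hb]

-- a nonzero head opens a run: goA emits k-1 zeros and the carried run sum
lemma goA_run (xs : List Int) (x s : Int) (hx : x ≠ 0) :
    goA s (x :: xs) =
      List.replicate (runlenAlt (x :: xs) - 1) 0 ++
        (s + ((x :: xs).take (runlenAlt (x :: xs))).sum) ::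
        goA 0 ((x :: xs).drop (runlenAlt (x :: xs))) := by
  induction xs generalizing x s with
  | nil => simp [goA, runlenAlt, hx]
  | cons b rest ih =>
    by_cases hb : b = 0
    · simp [goA, runlenAlt, hx, hb]
    · have h1 := pvRunlen_pos b rest hb
      rw [show goA s (x :: b :: rest) = 0 :: goA (s + x) (b :: rest) by simp [goA, hx, hb]]
      rw [ih b (s + x) hb]
      have hk : runlenAlt (x :: b :: rest) = 1 + runlenAlt (b :: rest) := by simp [runlenAlt, hx]
      rw [hk]
      simp only [Nat.add_comm 1, List.take_succ_cons, List.drop_succ_cons]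
      rw [show (runlenAlt (b :: rest) + 1 - 1) = (runlenAlt (b :: rest) - 1) + 1 by omega]
      simp [List.replicate_succ]
      ring_nf

lemma pvGoCollapse (l : List Int) : goA 0 l = collapseAlt l := by
  rcases hl : l with _ | ⟨x, xs⟩
  · simp [goA, collapseAlt]
  · by_cases hx : x = 0
    · subst hx
      rw [goA_zero_cons, pvGoCollapse xs]
      simp [collapseAlt]
    · rw [goA_run xs x 0 hx, pvGoCollapse ((x :: xs).drop (runlenAlt (x :: xs)))]
      rw [collapseAlt]
      rw [runAlt_snd, runAlt_fst]
      simp [hx]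
termination_by l.length
decreasing_by
  · simp
  · have := pvRunlen_pos x xs hx
    simp [List.length_drop]
    omega

-- ===== VERDICT (by name: the statement is the Claim_ definition above) =====
theorem arrange_list_spec : Claim_equal_arrange_list := by
  intro arr _
  unfold Spec_arrange_list arrange_list_alt
  rcases arr with _ | ⟨x, xs⟩
  · simp [arrange_list, collapseAlt, PySem.List.pyRange]
  · have h0 := pvLoop (x :: xs) [] 0 (by simp)
    simp only [List.length_nil, Int.natCast_zero, List.nil_append, zero_add] at h0
    unfold arrange_list
    rw [show ((((x :: xs).length : Int)) - 1) = ((0:Int) + (x :: xs).length - 1) by ring] at *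
    rw [h0]
    rw [← pvGoCollapse]
    exact pvFin (x :: xs) 0 (by simp)
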